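-- pv_equiv track=rewrite | github.com/hiKeytech/sparktool | apps/frontend/inline-pages.py | merge_imports
-- ===== SOURCE A (Python) =====
-- def merge_imports(route_blocks, page_blocks):
--     """
--     Merge route and page import blocks: deduplicate by module path.
--     If same module appears in both, use the route version for route-only
--     modules (createFileRoute, z) and the page version for everything else.
--     Page blocks win for shared modules (they may import more symbols).
--     """
--     route_modules = {m: t for t, m in route_blocks}
--     page_modules  = {m: t for t, m in page_blocks}
--
--     all_modules = list(dict.fromkeys(
--         [m for _, m in route_blocks] + [m for _, m in page_blocks]
--     ))
--
--     result = []
--     for mod in all_modules: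
--         if mod in ("@tanstack/react-router", "zod", "zod/v4"):
--             # Route file owns these (createFileRoute, z); use route version
--             if mod in route_modules:
--                 result.append(route_modules[mod])
--         elif mod in page_modules:
--             result.append(page_modules[mod])
--         elif mod in route_modules:
--             result.append(route_modules[mod])
--     return result
-- ===== SOURCE B (Python) =====
-- SPECIAL = ("@tanstack/react-router", "zod", "zod/v4")
--
-- def merge_imports(route_blocks, page_blocks):
--     merged = {}
--     for t, m in route_blocks:
--         merged[m] = t
--     for t, m in page_blocks:
--         if m not in SPECIAL:
--             merged[m] = t
--     return list(merged.values())
-- ===== Notes on version B (the rewrite author's own statement) =====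
-- stated objective: simpler
-- what changed: Replaces the two lookup dicts, the separate ordered dedup list and the per-module three-way selection loop by one ordered dict built in two overriding passes (route first, then non-special page entries), returning its values.
import Mathlib
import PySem

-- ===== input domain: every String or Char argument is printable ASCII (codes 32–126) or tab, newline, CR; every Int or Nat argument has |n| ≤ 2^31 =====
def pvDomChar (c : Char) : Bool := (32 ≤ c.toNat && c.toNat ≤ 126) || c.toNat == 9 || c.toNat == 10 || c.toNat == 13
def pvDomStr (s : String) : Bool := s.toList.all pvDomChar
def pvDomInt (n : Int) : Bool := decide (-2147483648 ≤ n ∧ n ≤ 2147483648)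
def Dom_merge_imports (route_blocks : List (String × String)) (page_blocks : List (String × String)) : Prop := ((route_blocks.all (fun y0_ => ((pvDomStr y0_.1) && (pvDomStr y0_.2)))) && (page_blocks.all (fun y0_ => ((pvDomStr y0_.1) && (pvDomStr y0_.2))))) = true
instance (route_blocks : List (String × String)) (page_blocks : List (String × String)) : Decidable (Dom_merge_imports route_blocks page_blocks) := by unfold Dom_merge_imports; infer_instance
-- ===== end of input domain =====

-- B builds one ordered dict in two overriding passes (route, then non-special page entries)
-- instead of A's two lookup dicts + ordered dedup list + three-way selection loop; objective: simpler.

-- ===== PORT A =====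
def merge_imports (route_blocks : List (String × String)) (page_blocks : List (String × String)) : List String :=
  let route_modules : PySem.Dict String String :=
    route_blocks.foldl (fun d p => d.insert p.2 p.1) PySem.Dict.empty
  let page_modules : PySem.Dict String String :=
    page_blocks.foldl (fun d p => d.insert p.2 p.1) PySem.Dict.empty
  let all_modules :=
    PySem.List.dedup (route_blocks.map (fun p => p.2) ++ page_blocks.map (fun p => p.2))
  all_modules.foldl (fun result mod =>
    if mod = "@tanstack/react-router" ∨ mod = "zod" ∨ mod = "zod/v4" then
      if route_modules.contains mod then result ++ [route_modules.getD mod ""] else result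
    else if page_modules.contains mod then result ++ [page_modules.getD mod ""]
    else if route_modules.contains mod then result ++ [route_modules.getD mod ""]
    else result) []

-- ===== PORT B =====
def merge_imports_alt (route_blocks : List (String × String)) (page_blocks : List (String × String)) : List String :=
  let merged : PySem.Dict String String :=
    route_blocks.foldl (fun d p => d.insert p.2 p.1) PySem.Dict.empty
  let merged :=
    page_blocks.foldl (fun d p =>
      if ¬ (p.2 = "@tanstack/react-router" ∨ p.2 = "zod" ∨ p.2 = "zod/v4")
      then d.insert p.2 p.1 else d) merged
  merged.values

-- ===== PRECONDITION & SPEC =====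
def Spec_merge_imports (route_blocks : List (String × String)) (page_blocks : List (String × String)) (out : List String) : Prop := out = merge_imports_alt route_blocks page_blocks
instance (route_blocks : List (String × String)) (page_blocks : List (String × String)) (out : List String) : Decidable (Spec_merge_imports route_blocks page_blocks out) := by unfold Spec_merge_imports; infer_instance

-- ===== CLAIM (what is proved, stated in full; the proofs are below) =====
def Claim_equal_merge_imports : Prop := ∀ (route_blocks : List (String × String)) (page_blocks : List (String × String)), Dom_merge_imports route_blocks page_blocks → Spec_merge_imports route_blocks page_blocks (merge_imports route_blocks page_blocks)

-- ===== LEMMAS AND PROOFS =====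

def pvF (l : List (String × String)) (d : PySem.Dict String String) : PySem.Dict String String :=
  l.foldl (fun d p => d.insert p.2 p.1) d

def pvLast (l : List (String × String)) (k : String) : Option String :=
  (l.reverse.find? (fun p => p.2 == k)).map Prod.fst

theorem pvF_get? (l : List (String × String)) (d : PySem.Dict String String) (k : String) :
    (pvF l d).get? k = (pvLast l k).or (d.get? k) := by
  induction l generalizing d with
  | nil => simp [pvF, pvLast]
  | cons p l ih =>
    simp only [pvF, List.foldl_cons] at *
    rw [ih]
    simp only [pvLast, List.reverse_cons, List.find?_append]
    rcases h : (l.reverse.find? (fun p => p.2 == k)) with _ | q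
    · simp only [h, Option.map_none, Option.none_or, PySem.Dict.get?_insert, List.find?_cons,
        List.find?_nil]
      by_cases hk : k = p.2
      · simp [hk]
      · have h2 : (p.2 == k) = false := by
          simp only [beq_eq_false_iff_ne, ne_eq]
          exact fun h' => hk h'.symm
        simp [hk, h2]
    · simp [h]

theorem pvFlatMap_toList (f : String → Option String) (l : List String) :
    l.flatMap (fun k => (f k).toList) = (l.filter (fun k => (f k).isSome)).map (fun k => (f k).getD "") := by
  induction l with
  | nil => rfl
  | cons x l ih =>
    simp only [List.flatMap_cons, List.filter_cons]
    rcases h : f x with _ | v <;> simp [h, ih]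

theorem pvFind?_filter (l : List (String × String)) (q : (String × String) → Bool) (pred : (String × String) → Bool)
    (h : ∀ x, pred x = true → q x = true) : (l.filter q).find? pred = l.find? pred := by
  induction l with
  | nil => rfl
  | cons x l ih =>
    simp only [List.filter_cons]
    by_cases hq : q x = true
    · simp [hq, List.find?_cons, ih]
    · have hp : pred x = false := by
        cases hpx : pred x
        · rfl
        · exact absurd (h x hpx) hq
      simp [hq, hp, ih]

theorem pvFilter_add (s : PySem.Set String) (x : String) (p : String → Bool) :
    (PySem.Set.add s x).filter p = if p x then PySem.Set.add (s.filter p) x else s.filter p := by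
  rw [PySem.Set.add_eq_ite, PySem.Set.add_eq_ite]
  by_cases hm : x ∈ s <;> by_cases hp : p x = true
  · simp [hm, hp, List.mem_filter.mpr ⟨hm, hp⟩]
  · simp [hm, hp]
  · have : x ∉ s.filter p := fun h => hm (List.mem_filter.mp h).1
    simp [hm, hp, this, List.filter_append]
  · simp [hm, hp, List.filter_append]

theorem pvFilter_ofList (xs : List String) (p : String → Bool) :
    (PySem.Set.ofList xs).filter p = PySem.Set.ofList (xs.filter p) := by
  induction xs using List.reverseRecOn with
  | nil => rfl
  | append_singleton xs x ih =>
    rw [PySem.Set.ofList_append_singleton, pvFilter_add, List.filter_append]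
    by_cases hp : p x = true
    · simp [hp, PySem.Set.ofList_append_singleton, ih]
    · simp [Bool.eq_false_iff.mpr hp, ih]

theorem pvUpdate_filter_congr (xs : List String) (s : PySem.Set String) (p q : String → Bool)
    (h : ∀ x ∈ xs, p x ≠ q x → x ∈ s) :
    PySem.Set.update s (xs.filter p) = PySem.Set.update s (xs.filter q) := by
  induction xs generalizing s with
  | nil => rfl
  | cons x xs ih =>
    have htail : ∀ y ∈ xs, p y ≠ q y → y ∈ s := fun y hy => h y (List.mem_cons_of_mem _ hy)
    have htail' : ∀ y ∈ xs, p y ≠ q y → y ∈ PySem.Set.add s x := fun y hy hne =>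
      (PySem.Set.mem_add _ _ _).mpr (Or.inl (htail y hy hne))
    simp only [List.filter_cons]
    by_cases hpq : p x = q x
    · cases hq : q x
      · rw [hpq, hq, if_neg (by simp), if_neg (by simp)]
        exact ih s htail
      · rw [hpq, hq, if_pos rfl, if_pos rfl, PySem.Set.update_cons, PySem.Set.update_cons]
        exact ih (PySem.Set.add s x) htail'
    · have hx : x ∈ s := h x List.mem_cons_self hpq
      have hadd : PySem.Set.add s x = s := PySem.Set.add_of_mem hx
      cases hp : p x <;> cases hq : q x
      · exact absurd rfl (hp ▸ hq ▸ hpq)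
      · rw [if_neg (by simp), if_pos rfl, PySem.Set.update_cons, hadd]
        exact ih s htail
      · rw [if_pos rfl, if_neg (by simp), PySem.Set.update_cons, hadd]
        exact ih s htail
      · exact absurd rfl (hp ▸ hq ▸ hpq)

theorem pvSel1 (d : PySem.Dict String String) (k : String) :
    (if d.contains k then [d.getD k ""] else []) = (d.get? k).toList := by
  rcases h : d.get? k with _ | v
  · rw [PySem.Dict.contains_eq_isSome_get?, h]; rfl
  · rw [PySem.Dict.contains_eq_isSome_get?, h, PySem.Dict.getD_eq_get?_getD, h]; rfl

theorem pvSel2 (d1 d2 : PySem.Dict String String) (k : String) :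
    (if d1.contains k then [d1.getD k ""] else if d2.contains k then [d2.getD k ""] else []) =
      ((d1.get? k).or (d2.get? k)).toList := by
  rcases h : d1.get? k with _ | v
  · rw [PySem.Dict.contains_eq_isSome_get?, h]
    simpa using pvSel1 d2 k
  · rw [PySem.Dict.contains_eq_isSome_get?, h, PySem.Dict.getD_eq_get?_getD, h]; rfl

theorem pv_rd_get (rb : List (String × String)) (k : String) :
    (pvF rb PySem.Dict.empty).get? k = pvLast rb k := by
  rw [pvF_get?, PySem.Dict.get?_empty, Option.or_none]

theorem pvLast_isSome (l : List (String × String)) (k : String) (h : k ∈ l.map Prod.snd) :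
    (pvLast l k).isSome := by
  simp only [pvLast, Option.isSome_map, List.find?_isSome]
  rcases List.mem_map.mp h with ⟨p, hp, hk⟩
  exact ⟨p, List.mem_reverse.mpr hp, by simp [hk]⟩

theorem pvMem_of_last_isSome (l : List (String × String)) (k : String)
    (h : (pvLast l k).isSome) : k ∈ l.map Prod.snd := by
  simp only [pvLast, Option.isSome_map, List.find?_isSome] at h
  rcases h with ⟨p, hp, hk⟩
  exact List.mem_map.mpr ⟨p, List.mem_reverse.mp hp, by simpa [eq_comm] using beq_iff_eq.mp hk⟩

theorem pv_main (rb pb : List (String × String)) : merge_imports rb pb = merge_imports_alt rb pb := by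
  simp only [merge_imports, merge_imports_alt]
  rw [PySem.List.foldl_ite_eq_foldl_filter]
  set rd := List.foldl (fun (d : PySem.Dict String String) p => d.insert p.2 p.1) PySem.Dict.empty rb with hrd
  set pd := List.foldl (fun (d : PySem.Dict String String) p => d.insert p.2 p.1) PySem.Dict.empty pb with hpd
  set pbf := List.filter (fun x => decide ¬(x.2 = "@tanstack/react-router" ∨ x.2 = "zod" ∨ x.2 = "zod/v4")) pb with hpbf
  set M := List.foldl (fun (d : PySem.Dict String String) p => d.insert p.2 p.1) rd pbf with hM
  set v : String → Option String := fun k =>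
    if k = "@tanstack/react-router" ∨ k = "zod" ∨ k = "zod/v4" then rd.get? k
    else (pd.get? k).or (rd.get? k) with hv
  -- lookup characterisations
  have hrdget : ∀ k, rd.get? k = pvLast rb k := fun k => pv_rd_get rb k
  have hpdget : ∀ k, pd.get? k = pvLast pb k := fun k => pv_rd_get pb k
  have hMget : ∀ k, M.get? k = (pvLast pbf k).or (rd.get? k) := fun k => pvF_get? pbf rd k
  -- A's loop body appends (v mod).toList
  have hstep : ∀ mod ∈ PySem.List.dedup (List.map (fun p => p.2) rb ++ List.map (fun p => p.2) pb),
      ∀ res : List String,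
      (if mod = "@tanstack/react-router" ∨ mod = "zod" ∨ mod = "zod/v4" then
        if rd.contains mod = true then res ++ [rd.getD mod ""] else res
      else if pd.contains mod = true then res ++ [pd.getD mod ""]
      else if rd.contains mod = true then res ++ [rd.getD mod ""] else res)
      = res ++ (v mod).toList := by
    intro mod _ res
    by_cases hs : mod = "@tanstack/react-router" ∨ mod = "zod" ∨ mod = "zod/v4"
    · rw [if_pos hs, hv]
      simp only [if_pos hs]
      rw [← pvSel1 rd mod]
      split <;> simp
    · rw [if_neg hs, hv]
      simp only [if_neg hs]
      rw [← pvSel2 pd rd mod]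
      split
      · simp
      · split <;> simp
  have hA := PySem.List.foldl_congr_mem' _ _ (fun res mod => res ++ (v mod).toList)
    ([] : List String) hstep
  rw [hA, PySem.List.foldl_append_eq_flatMap, List.nil_append, pvFlatMap_toList]
  -- B's values as a map over its keys
  have hnodM : M.keys.Nodup := by
    rw [hM]
    exact PySem.Dict.nodup_keys_foldl_insert_key pbf Prod.snd _ rd
      (PySem.Dict.nodup_keys_foldl_insert_key rb Prod.snd _ _ PySem.Dict.nodup_keys_empty)
  rw [PySem.Dict.values_eq_map_keys M hnodM ""]
  have hkeys : M.keys = PySem.Set.update (PySem.Set.ofList (rb.map (fun p => p.2)))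
      (pbf.map (fun p => p.2)) := by
    rw [hM, PySem.Dict.keys_foldl_insert_key, hrd, PySem.Dict.keys_foldl_insert_key,
      PySem.Dict.keys_empty, PySem.Set.update_nil_left]
  have hmapf : pbf.map (fun p : String × String => p.2)
      = (pb.map (fun p => p.2)).filter
          (fun m => decide ¬(m = "@tanstack/react-router" ∨ m = "zod" ∨ m = "zod/v4")) := by
    rw [List.filter_map]
    rfl
  -- key lists agree
  have hkeyeq : (PySem.List.dedup (List.map (fun p => p.2) rb ++ List.map (fun p => p.2) pb)).filter
      (fun k => (v k).isSome) = M.keys := by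
    rw [PySem.List.dedup_eq_ofList, pvFilter_ofList, List.filter_append]
    have hrfilt : (List.map (fun p : String × String => p.2) rb).filter (fun k => (v k).isSome)
        = List.map (fun p : String × String => p.2) rb := by
      rw [List.filter_eq_self]
      intro k hk
      have hr : (rd.get? k).isSome := by
        rw [hrdget]; exact pvLast_isSome rb k hk
      rw [hv]
      by_cases hs : k = "@tanstack/react-router" ∨ k = "zod" ∨ k = "zod/v4"
      · simpa [hs] using hr
      · simp [hs, Option.isSome_or, hr]
    rw [hrfilt, PySem.Set.ofList_append, hkeys, hmapf]
    apply pvUpdate_filter_congr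
    intro m hm hne
    simp only at hne
    by_cases hs : m = "@tanstack/react-router" ∨ m = "zod" ∨ m = "zod/v4"
    · have hq : (decide ¬(m = "@tanstack/react-router" ∨ m = "zod" ∨ m = "zod/v4")) = false :=
        decide_eq_false (not_not_intro hs)
      rw [hq] at hne
      have hP : (v m).isSome = true := Bool.ne_false_iff.mp hne
      have hr : (rd.get? m).isSome := by simpa [hv, hs] using hP
      rw [hrdget] at hr
      have hmem := pvMem_of_last_isSome rb m hr
      simpa [PySem.Set.mem_ofList] using hmem
    · have hq : (decide ¬(m = "@tanstack/react-router" ∨ m = "zod" ∨ m = "zod/v4")) = true :=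
        decide_eq_true hs
      have hp : (pd.get? m).isSome := by rw [hpdget]; exact pvLast_isSome pb m hm
      have hPt : (v m).isSome = true := by simp [hv, hs, Option.isSome_or, hp]
      exact absurd hPt (hq ▸ hne)
  rw [hkeyeq]
  -- values agree pointwise
  refine List.map_congr_left ?_
  intro k _
  rw [PySem.Dict.getD_eq_get?_getD, hMget k]
  by_cases hs : k = "@tanstack/react-router" ∨ k = "zod" ∨ k = "zod/v4"
  · have hnone : pvLast pbf k = none := by
      simp only [pvLast, Option.map_eq_none_iff, List.find?_eq_none]
      intro p hp hbeq
      have hfp := (List.mem_filter.mp (List.mem_reverse.mp (hpbf ▸ hp))).2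
      rw [beq_iff_eq.mp hbeq] at hfp
      simp [hs] at hfp
    rw [hnone, Option.none_or, hv]
    simp [hs]
  · have hfilt : pvLast pbf k = pvLast pb k := by
      rw [pvLast, pvLast, hpbf, ← List.filter_reverse, pvFind?_filter]
      intro x hx
      have : x.2 = k := beq_iff_eq.mp hx
      simp [this, hs]
    rw [hfilt, hv]
    simp [hs, hpdget k]

-- ===== VERDICT (by name: the statement is the Claim_ definition above) =====
theorem merge_imports_spec : Claim_equal_merge_imports := by
  intro rb pb _
  unfold Spec_merge_imports
  exact pv_main rb pb
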